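-- pv_equiv track=rewrite | github.com/cholwell/dancing-links | sudoku.py | option_lookup
-- ===== SOURCE A (Python) =====
-- def option_lookup(option):
--     """returns the location and value of a move in sudoku based off the option from the constraint matrix"""
--     output_row = 1
--     output_column = 1
--     output_value = 1
--     for iter in range(1,option+1):
--         output_value +=1
--         if output_value == 10:
--             output_value = 1
--         if iter > 8 and iter % 9 == 0:
--             output_column +=1
--             if output_column == 10:
--                 output_column = 1
--         if iter > 80 and iter % 81 == 0:
--             output_row +=1
--
--     output = [output_row, output_column, output_value]
--     return output
-- ===== SOURCE B (Python) =====
-- def option_lookup(option):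
--     """returns the location and value of a move in sudoku based off the option from the constraint matrix"""
--     return [option // 81 + 1, (option // 9) % 9 + 1, option % 9 + 1]
-- ===== Notes on version B (the rewrite author's own statement) =====
-- stated objective: faster
-- what changed: replaces the O(option) counting loop by three closed-form modular-arithmetic expressions (row = option//81+1, col = (option//9)%9+1, value = option%9+1)
-- outside the precondition, e.g. on option_lookup(-5): A returns [1, 1, 1], B returns [0, 9, 5]
import Mathlib
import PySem

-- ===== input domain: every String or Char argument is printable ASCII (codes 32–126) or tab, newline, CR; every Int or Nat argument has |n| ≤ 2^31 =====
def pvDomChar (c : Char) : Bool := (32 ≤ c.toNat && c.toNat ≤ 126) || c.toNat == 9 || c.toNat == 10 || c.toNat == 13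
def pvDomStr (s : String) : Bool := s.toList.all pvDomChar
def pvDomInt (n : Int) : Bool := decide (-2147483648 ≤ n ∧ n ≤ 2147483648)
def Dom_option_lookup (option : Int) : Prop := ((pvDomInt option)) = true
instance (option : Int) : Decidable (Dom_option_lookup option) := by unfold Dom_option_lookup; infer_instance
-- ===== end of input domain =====

-- B replaces A's O(option) counting loop by three closed-form modular expressions (objective: faster).

-- ===== PORT A =====
-- loop body of A: state (row, col, value), one step per iter
def optStep (st : Int × Int × Int) (iter : Int) : Int × Int × Int :=
  let row := st.1
  let col := st.2.1
  let val := st.2.2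
  let val := val + 1
  let val := if val = 10 then 1 else val
  let col :=
    if iter > 8 ∧ PySem.Int.mod iter 9 = 0 then
      (if col + 1 = 10 then 1 else col + 1)
    else col
  let row := if iter > 80 ∧ PySem.Int.mod iter 81 = 0 then row + 1 else row
  (row, col, val)

def option_lookup (option : Int) : List Int :=
  let st := (PySem.List.pyRange 1 (option + 1) 1).foldl optStep (1, 1, 1)
  [st.1, st.2.1, st.2.2]

-- ===== PORT B =====
def option_lookup_alt (option : Int) : List Int :=
  [PySem.Int.floordiv option 81 + 1,
   PySem.Int.mod (PySem.Int.floordiv option 9) 9 + 1,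
   PySem.Int.mod option 9 + 1]

-- ===== PRECONDITION & SPEC =====
-- Pre_ excludes negative option, which is outside the constraint-matrix index domain; there A's
-- loop body never runs and it returns [1, 1, 1] accidentally, while B's floor-division formulas
-- give a different value.
def Pre_option_lookup (option : Int) : Prop := 0 ≤ option
instance (option : Int) : Decidable (Pre_option_lookup option) := by unfold Pre_option_lookup; infer_instance
def pvWitness_option_lookup : Int := (82)

def Spec_option_lookup (option : Int) (out : List Int) : Prop := out = option_lookup_alt option
instance (option : Int) (out : List Int) : Decidable (Spec_option_lookup option out) := by unfold Spec_option_lookup; infer_instance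

-- ===== CLAIM (what is proved, stated in full; the proofs are below) =====
def Claim_equal_option_lookup : Prop := ∀ (option : Int), Dom_option_lookup option → Pre_option_lookup option → Spec_option_lookup option (option_lookup option)

-- ===== LEMMAS AND PROOFS =====

-- loop invariant: after iterations 1..n the state is given by the closed form
lemma optLoop_inv (n : Nat) :
    (PySem.List.pyRange 1 ((n : Int) + 1) 1).foldl optStep (1, 1, 1)
      = ((n : Int) / 81 + 1, ((n : Int) / 9) % 9 + 1, (n : Int) % 9 + 1) := by
  induction n with
  | zero => simp [PySem.List.pyRange_one_eq_nil]
  | succ n ih =>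
    have h1 : (1 : Int) ≤ (n : Int) + 1 := by omega
    have hsplit : PySem.List.pyRange 1 ((↑(n + 1) : Int) + 1) 1
        = PySem.List.pyRange 1 ((n : Int) + 1) 1 ++ [(n : Int) + 1] := by
      push_cast
      exact PySem.List.pyRange_one_succ_right h1
    rw [hsplit, List.foldl_append, ih]
    simp only [List.foldl_cons, List.foldl_nil, optStep,
      PySem.Int.mod_eq_emod_of_pos (a := (n : Int) + 1) (by norm_num : (0:Int) < 9),
      PySem.Int.mod_eq_emod_of_pos (a := (n : Int) + 1) (by norm_num : (0:Int) < 81)]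
    push_cast
    split_ifs <;> simp only [Prod.mk.injEq] <;> refine ⟨by omega, by omega, by omega⟩

theorem option_lookup_spec : Claim_equal_option_lookup := by
  intro option _ hpre
  have h0 : 0 ≤ option := hpre
  unfold Spec_option_lookup option_lookup option_lookup_alt
  obtain ⟨n, rfl⟩ : ∃ m : Nat, option = (m : Int) := ⟨option.toNat, by omega⟩
  rw [optLoop_inv n]
  rw [PySem.Int.floordiv_eq_ediv_of_pos (by norm_num : (0:Int) < 81),
      PySem.Int.floordiv_eq_ediv_of_pos (by norm_num : (0:Int) < 9),
      PySem.Int.mod_eq_emod_of_pos (by norm_num : (0:Int) < 9),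
      PySem.Int.mod_eq_emod_of_pos (by norm_num : (0:Int) < 9)]
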